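-- pv_equiv track=rewrite | github.com/Hacktomm/dds-explorary-encoder | utils/functions/constraints.py | max_run_length
-- ===== SOURCE A (Python) =====
-- def max_run_length(seq: str) -> int:
--     if not seq:
--         return 0
--     m, cur, prev = 1, 1, seq[0]
--     for c in seq[1:]:
--         if c == prev:
--             cur += 1
--             m = max(m, cur)
--         else:
--             cur = 1
--             prev = c
--     return m
-- ===== SOURCE B (Python) =====
-- from itertools import groupby
--
--
-- def max_run_length(seq: str) -> int:
--     return max((sum(1 for _ in g) for _, g in groupby(seq)), default=0)
-- ===== Notes on version B (the rewrite author's own statement) =====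
-- stated objective: idiomatic
-- what changed: Replaces the explicit prev/cur/m state machine with itertools.groupby: partition the string into maximal runs and take the maximum run length with default 0.
import Mathlib
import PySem

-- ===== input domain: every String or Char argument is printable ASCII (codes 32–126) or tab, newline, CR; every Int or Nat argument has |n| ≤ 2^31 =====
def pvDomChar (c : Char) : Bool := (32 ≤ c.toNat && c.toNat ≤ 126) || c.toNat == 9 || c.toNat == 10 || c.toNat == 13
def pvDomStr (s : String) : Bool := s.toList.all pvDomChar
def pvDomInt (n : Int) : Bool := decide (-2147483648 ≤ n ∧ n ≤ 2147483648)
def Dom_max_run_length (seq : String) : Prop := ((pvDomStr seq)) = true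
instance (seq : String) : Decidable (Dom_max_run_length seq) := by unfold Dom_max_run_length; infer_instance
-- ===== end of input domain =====

-- B replaces A's explicit prev/cur/m state machine with a group-into-runs-then-maximum
-- decomposition (itertools.groupby + max with default 0); same O(n) cost, more idiomatic.

-- ===== PORT A =====
-- the for-loop over seq[1:] with state (m, cur, prev)
def mrlLoop : List Char → Int → Int → Char → Int
  | [], m, _, _ => m
  | c :: cs, m, cur, prev =>
      if c == prev then mrlLoop cs (max m (cur + 1)) (cur + 1) prev
      else mrlLoop cs m 1 c

def max_run_length (seq : String) : Int :=
  match seq.toList with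
  | [] => 0
  | c :: cs => mrlLoop cs 1 1 c

-- ===== PORT B =====
-- itertools.groupby: maximal runs of consecutive equal characters, in order
def pyGroupRuns : List Char → List (List Char)
  | [] => []
  | c :: cs =>
    match pyGroupRuns cs with
    | (d :: ds) :: rest => if c == d then (c :: d :: ds) :: rest else [c] :: (d :: ds) :: rest
    | rs => [c] :: rs

-- max(lengths, default=0)
def max_run_length_alt (seq : String) : Int :=
  (PySem.List.max? ((pyGroupRuns seq.toList).map (fun g => (g.length : Int))) (fun x => x)).getD 0

-- ===== PRECONDITION & SPEC =====
def Spec_max_run_length (seq : String) (out : Int) : Prop := out = max_run_length_alt seq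
instance (seq : String) (out : Int) : Decidable (Spec_max_run_length seq out) := by unfold Spec_max_run_length; infer_instance

-- ===== CLAIM (what is proved, stated in full; the proofs are below) =====
def Claim_equal_max_run_length : Prop := ∀ (seq : String), Dom_max_run_length seq → Spec_max_run_length seq (max_run_length seq)

-- ===== LEMMAS AND PROOFS =====

/-- lengths of runs, as Ints (proof-side abbreviation). -/
def lensOf (rs : List (List Char)) : List Int := rs.map (fun g => (g.length : Int))

/-- Max of a list of Ints with default 0 (the shape the B side produces). -/
def pvMax0 (xs : List Int) : Int := xs.foldr max 0

theorem pvMax0_nil : pvMax0 [] = 0 := rfl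

theorem pvMax0_cons (x : Int) (l : List Int) : pvMax0 (x :: l) = max x (pvMax0 l) := rfl

theorem pvMax0_nonneg (xs : List Int) : 0 ≤ pvMax0 xs := by
  induction xs with
  | nil => simp [pvMax0_nil]
  | cons a t ih => rw [pvMax0_cons]; exact le_trans ih (le_max_right _ _)

theorem foldl_max_eq (t : List Int) : ∀ x : Int, 0 ≤ x → t.foldl max x = max x (pvMax0 t) := by
  induction t with
  | nil => intro x hx; rw [pvMax0_nil]; simp; omega
  | cons a t ih =>
      intro x hx
      rw [List.foldl_cons, ih (max x a) (le_trans hx (le_max_left _ _)), pvMax0_cons, max_assoc]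

theorem pyGroupRuns_shape (c : Char) (cs : List Char) :
    ∃ r rs, pyGroupRuns (c :: cs) = (c :: r) :: rs := by
  induction cs generalizing c with
  | nil => exact ⟨[], [], rfl⟩
  | cons d cs' ih =>
      obtain ⟨r, rs, h⟩ := ih d
      by_cases hcd : c = d
      · refine ⟨d :: r, rs, ?_⟩
        rw [pyGroupRuns, h]
        simp [hcd]
      · refine ⟨[], (d :: r) :: rs, ?_⟩
        rw [pyGroupRuns, h]
        simp [hcd]

/-- Loop invariant: with 1 ≤ cur ≤ m, the loop computes the max of m, the current run
    extended into `cs`, and all later runs of `c :: cs`. -/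
theorem mrlLoop_eq (cs : List Char) : ∀ (m cur : Int) (c : Char) (r : List Char) (rs : List (List Char)),
    1 ≤ cur → cur ≤ m → pyGroupRuns (c :: cs) = (c :: r) :: rs →
    mrlLoop cs m cur c = max m (max (cur + (r.length : Int)) (pvMax0 (lensOf rs))) := by
  induction cs with
  | nil =>
      intro m cur c r rs h1 h2 h
      simp only [pyGroupRuns] at h
      simp only [List.cons.injEq] at h
      obtain ⟨⟨-, hr⟩, hrs⟩ := h
      subst hr; subst hrs
      simp only [mrlLoop, lensOf, List.map_nil, pvMax0_nil, List.length_nil]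
      simp only [max_def]; split_ifs <;> omega
  | cons d cs' ih =>
      intro m cur c r rs h1 h2 h
      obtain ⟨r', rs', h'⟩ := pyGroupRuns_shape d cs'
      have hnn := pvMax0_nonneg (lensOf rs')
      by_cases hcd : c = d
      · subst hcd
        rw [pyGroupRuns, h'] at h
        simp only [beq_self_eq_true, if_true, List.cons.injEq, true_and] at h
        obtain ⟨hr, hrs⟩ := h
        subst hr; subst hrs
        have hrec := ih (max m (cur + 1)) (cur + 1) c r' rs' (by omega) (le_max_right _ _) h'
        simp only [mrlLoop, beq_self_eq_true, if_pos]
        rw [hrec]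
        simp only [lensOf, List.length_cons]
        push_cast
        simp only [max_def]; split_ifs <;> omega
      · rw [pyGroupRuns, h'] at h
        have hb : (c == d) = false := by simp [hcd]
        simp only [hb, Bool.false_eq_true, if_false, List.cons.injEq, true_and] at h
        obtain ⟨hr, hrs⟩ := h
        subst hr; subst hrs
        have hrec := ih m 1 d r' rs' le_rfl (by omega) h'
        have hcd' : (d == c) = false := by simp; intro h0; exact hcd h0.symm
        simp only [mrlLoop, hcd']
        rw [if_neg (by simpa using hcd), hrec]
        simp only [lensOf, List.map_cons, pvMax0_cons, List.length_cons, List.length_nil]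
        push_cast
        simp only [max_def]; split_ifs <;> omega

-- ===== VERDICT (by name: the statement is the Claim_ definition above) =====
theorem max_run_length_spec : Claim_equal_max_run_length := by
  intro seq _
  unfold Spec_max_run_length max_run_length max_run_length_alt
  cases hs : seq.toList with
  | nil => simp [pyGroupRuns, PySem.List.max?]
  | cons c cs =>
      obtain ⟨r, rs, h⟩ := pyGroupRuns_shape c cs
      rw [h]
      show mrlLoop cs 1 1 c = _
      rw [mrlLoop_eq cs 1 1 c r rs le_rfl le_rfl h]
      have hmap : (((c :: r) :: rs).map (fun g => (g.length : Int))) = ((r.length : Int) + 1) :: lensOf rs := by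
        simp [lensOf]
      rw [hmap, PySem.List.max?_id_cons, Option.getD_some,
          foldl_max_eq _ _ (by positivity)]
      have hnn := pvMax0_nonneg (lensOf rs)
      simp only [max_def]; split_ifs <;> omega
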